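-- pv_equiv track=rewrite | github.com/luiseduaardo/Listas-IP | Lista 06 - Tuplas e Dicionários/Q001.py | descriptografa
-- ===== SOURCE A (Python) =====
-- ASCII_CHARS = (
--     ' ', '!', '"', '#', '$', '%', '&', "'", '(', ')', '*', '+', ',', '-', '.', '/',
--     '0', '1', '2', '3', '4', '5', '6', '7', '8', '9', ':', ';', '<', '=', '>', '?',
--     '@', 'A', 'B', 'C', 'D', 'E', 'F', 'G', 'H', 'I', 'J', 'K', 'L', 'M', 'N', 'O',
--     'P', 'Q', 'R', 'S', 'T', 'U', 'V', 'W', 'X', 'Y', 'Z', '[', '\\', ']', '^', '_',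
--     '`', 'a', 'b', 'c', 'd', 'e', 'f', 'g', 'h', 'i', 'j', 'k', 'l', 'm', 'n', 'o',
--     'p', 'q', 'r', 's', 't', 'u', 'v', 'w', 'x', 'y', 'z', '{', '|', '}', '~'
-- )
--
-- def descriptografa(criptografado): # faz o processo reverso de encriptação
--     tamanho = len(criptografado)
--     if tamanho % 2 == 0:
--         len_primeira_parte = len_segunda_parte = tamanho // 2
--
--     else:
--         len_primeira_parte = tamanho // 2
--         len_segunda_parte = tamanho - len_primeira_parte - 1
--
--     primeira_parte = criptografado[:len_primeira_parte]
--     segunda_parte = criptografado[len_segunda_parte:]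
--
--     segunda_parte = rotacionar(segunda_parte, 1)
--
--     string_completa = primeira_parte + segunda_parte
--     lista_string = list(string_completa)
--
--     lista_string.reverse()
--
--     string_completa = ''
--     for char in lista_string:
--         string_completa += char
--
--     string_completa = rotacionar(string_completa, -3)
--
--     return string_completa
--
-- def rotacionar(string, val_shift):
--     len_ascii = len(ASCII_CHARS)
--     lista_string = list(string)
--
--     palavra_final = ''
--
--     for char in lista_string:
--         for ascii_c in ASCII_CHARS:
--             if char == ascii_c:
--                 idx_ascii = ASCII_CHARS.index(ascii_c)
--                 idx_pos_deslocamento = (idx_ascii + val_shift) % len_ascii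
--                 carac = ASCII_CHARS[idx_pos_deslocamento]
--
--                 palavra_final += carac
--
--     return palavra_final
-- ===== SOURCE B (Python) =====
-- def descriptografa(criptografado):
--     # single pass: net shift -3 for the first half, -2 (=+1-3) from the middle on,
--     # using ord arithmetic instead of scanning the ASCII table; then reverse.
--     k = len(criptografado) // 2
--     out = []
--     for pos, ch in enumerate(criptografado):
--         o = ord(ch)
--         if 32 <= o <= 126:
--             shift = -3 if pos < k else -2
--             out.append(chr(32 + (o - 32 + shift) % 95))
--     out.reverse()
--     return ''.join(out)
-- ===== Notes on version B (the rewrite author's own statement) =====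
-- stated objective: faster
-- what changed: Replaces the slice/rotate/concat/reverse/rotate pipeline with its table scans (each char searched and re-indexed in the 95-entry tuple) by one pass that applies the net shift (-3 for the first half, -2 from the middle) via ord/chr modular arithmetic, then reverses once.
import Mathlib
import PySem

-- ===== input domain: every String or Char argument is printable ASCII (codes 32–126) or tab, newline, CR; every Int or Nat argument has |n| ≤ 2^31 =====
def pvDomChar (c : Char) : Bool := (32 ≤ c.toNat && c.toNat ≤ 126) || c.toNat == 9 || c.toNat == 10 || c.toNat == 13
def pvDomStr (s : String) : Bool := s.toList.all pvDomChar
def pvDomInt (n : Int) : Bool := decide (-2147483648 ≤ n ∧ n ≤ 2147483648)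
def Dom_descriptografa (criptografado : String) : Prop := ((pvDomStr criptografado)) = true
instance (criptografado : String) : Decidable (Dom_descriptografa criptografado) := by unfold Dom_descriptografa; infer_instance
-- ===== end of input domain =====

-- B replaces A's slice/rotate/concat/reverse/rotate pipeline (with its per-char table scans)
-- by one pass applying the net shift via ord/chr arithmetic, then a single reverse (objective: faster).

-- ===== PORT A =====
def asciiChars : List Char :=
[' ', '!', '"', '#', '$', '%', '&', '\'', '(', ')', '*', '+', ',', '-', '.', '/',
 '0', '1', '2', '3', '4', '5', '6', '7', '8', '9', ':', ';', '<', '=', '>', '?',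
 '@', 'A', 'B', 'C', 'D', 'E', 'F', 'G', 'H', 'I', 'J', 'K', 'L', 'M', 'N', 'O',
 'P', 'Q', 'R', 'S', 'T', 'U', 'V', 'W', 'X', 'Y', 'Z', '[', '\\', ']', '^', '_',
 '`', 'a', 'b', 'c', 'd', 'e', 'f', 'g', 'h', 'i', 'j', 'k', 'l', 'm', 'n', 'o',
 'p', 'q', 'r', 's', 't', 'u', 'v', 'w', 'x', 'y', 'z', '{', '|', '}', '~']

def rotacionar (string : String) (val_shift : Int) : String :=
  let len_ascii : Int := (asciiChars.length : Int)
  let lista_string := string.toList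
  let palavra_final : List Char := lista_string.foldl (fun palavra ch =>
    asciiChars.foldl (fun pal ascii_c =>
      if ch == ascii_c then
        -- ascii_c ∈ asciiChars, so .index never raises; getD's default is unreachable
        let idx_ascii : Int := (((PySem.List.index? asciiChars ascii_c).getD 0 : Nat) : Int)
        let idx_pos_deslocamento := PySem.Int.mod (idx_ascii + val_shift) len_ascii
        -- idx_pos_deslocamento ∈ [0, 95): ASCII_CHARS[...] never raises, default unreachable
        let carac := PySem.List.pyGetD asciiChars idx_pos_deslocamento ' '
        pal ++ [carac]
      else pal) palavra) []
  String.ofList palavra_final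

def descriptografa (criptografado : String) : String :=
  let tamanho : Int := (criptografado.length : Int)
  let len_primeira_parte : Int :=
    if PySem.Int.mod tamanho 2 == 0 then PySem.Int.floordiv tamanho 2
    else PySem.Int.floordiv tamanho 2
  let len_segunda_parte : Int :=
    if PySem.Int.mod tamanho 2 == 0 then PySem.Int.floordiv tamanho 2
    else tamanho - PySem.Int.floordiv tamanho 2 - 1
  let primeira_parte := String.ofList (PySem.List.slice criptografado.toList none (some len_primeira_parte))
  let segunda_parte := String.ofList (PySem.List.slice criptografado.toList (some len_segunda_parte) none)
  let segunda_parte := rotacionar segunda_parte 1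
  let string_completa := primeira_parte ++ segunda_parte
  let lista_string := string_completa.toList
  let lista_string := lista_string.reverse
  let string_completa := lista_string.foldl (fun s c => s.push c) ""
  rotacionar string_completa (-3)

-- ===== PORT B =====
def descriptografa_alt (criptografado : String) : String :=
  let k : Int := PySem.Int.floordiv (criptografado.length : Int) 2
  let out : List Char := (PySem.List.enumerate criptografado.toList).foldl
    (fun acc p =>
      let o : Int := (p.2.toNat : Int)
      if 32 ≤ o ∧ o ≤ 126 then
        let shift : Int := if p.1 < k then -3 else -2
        acc ++ [Char.ofNat (32 + (PySem.Int.mod (o - 32 + shift) 95)).toNat]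
      else acc) []
  String.ofList out.reverse

-- ===== PRECONDITION & SPEC =====
def Spec_descriptografa (criptografado : String) (out : String) : Prop := out = descriptografa_alt criptografado
instance (criptografado : String) (out : String) : Decidable (Spec_descriptografa criptografado out) := by unfold Spec_descriptografa; infer_instance

-- ===== CLAIM (what is proved, stated in full; the proofs are below) =====
def Claim_equal_descriptografa : Prop := ∀ (criptografado : String), Dom_descriptografa criptografado → Spec_descriptografa criptografado (descriptografa criptografado)

-- ===== LEMMAS AND PROOFS =====

-- per-character action of A's rotacionar, in B's arithmetic form
def rotChar (c : Char) (v : Int) : List Char :=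
  if 32 ≤ c.toNat ∧ c.toNat ≤ 126 then
    [Char.ofNat (32 + (PySem.Int.mod ((c.toNat : Int) - 32 + v) 95)).toNat]
  else []

theorem mod95 (a : Int) : PySem.Int.mod a 95 = a % 95 := by
  rw [PySem.Int.mod, Int.fmod_eq_emod]; simp

theorem tableEq : asciiChars = (List.range 95).map (fun j => Char.ofNat (32 + j)) := by decide

theorem table_nodup : asciiChars.Nodup := by decide

theorem table_len : (asciiChars.length : Int) = 95 := by decide

theorem idx95 : ((List.range 95).all (fun j => PySem.List.index? asciiChars (Char.ofNat (32+j)) == some j)) = true := by decide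

theorem get95 : ((List.range 95).all (fun j => PySem.List.pyGetD asciiChars (j:Int) ' ' == Char.ofNat (32+j))) = true := by decide

theorem mem_table_iff (c : Char) : c ∈ asciiChars ↔ (32 ≤ c.toNat ∧ c.toNat ≤ 126) := by
  rw [tableEq]
  simp only [List.mem_map, List.mem_range]
  constructor
  · rintro ⟨j, hj, rfl⟩
    have hv : (32 + j).isValidChar := Or.inl (by omega)
    rw [Char.toNat_ofNat, if_pos hv]
    omega
  · rintro ⟨h1, h2⟩
    refine ⟨c.toNat - 32, by omega, ?_⟩
    rw [show 32 + (c.toNat - 32) = c.toNat by omega, Char.ofNat_toNat]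

theorem index_table (c : Char) (h1 : 32 ≤ c.toNat) (h2 : c.toNat ≤ 126) :
    PySem.List.index? asciiChars c = some (c.toNat - 32) := by
  have hm := List.all_eq_true.mp idx95 (c.toNat - 32) (List.mem_range.mpr (by omega))
  rw [show 32 + (c.toNat - 32) = c.toNat by omega, Char.ofNat_toNat] at hm
  simpa using hm

theorem get_table (j : Int) (h0 : 0 ≤ j) (h1 : j < 95) :
    PySem.List.pyGetD asciiChars j ' ' = Char.ofNat (32 + j.toNat) := by
  have hm := List.all_eq_true.mp get95 j.toNat (List.mem_range.mpr (by omega))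
  rw [Int.toNat_of_nonneg h0] at hm
  simpa using hm

theorem filter_beq_nodup (l : List Char) (h : l.Nodup) (c : Char) :
    l.filter (fun a => c == a) = if c ∈ l then [c] else [] := by
  induction l with
  | nil => simp
  | cons a l ih =>
    simp only [List.nodup_cons] at h
    by_cases hc : c = a
    · subst hc
      simp [ih h.2, h.1]
    · simp [beq_eq_false_iff_ne.mpr hc, ih h.2, hc]

theorem inner_eq (c : Char) (v : Int) (acc : List Char) :
    asciiChars.foldl (fun pal ascii_c =>
      if c == ascii_c then
        pal ++ [PySem.List.pyGetD asciiChars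
          (PySem.Int.mod ((((PySem.List.index? asciiChars ascii_c).getD 0 : Nat) : Int) + v)
            (asciiChars.length : Int)) ' ']
      else pal) acc = acc ++ rotChar c v := by
  rw [PySem.List.foldl_append_if (fun a => c == a)
      (fun ascii_c => PySem.List.pyGetD asciiChars
        (PySem.Int.mod ((((PySem.List.index? asciiChars ascii_c).getD 0 : Nat) : Int) + v)
          (asciiChars.length : Int)) ' ')]
  rw [filter_beq_nodup _ table_nodup]
  by_cases hc : c ∈ asciiChars
  · have hb := (mem_table_iff c).mp hc
    rw [if_pos hc]
    simp only [List.map_cons, List.map_nil, rotChar, if_pos hb]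
    rw [index_table c hb.1 hb.2, table_len]
    simp only [Option.getD_some]
    have hcast : ((c.toNat - 32 : Nat) : Int) = (c.toNat : Int) - 32 := by omega
    rw [hcast]
    have hmb : 0 ≤ PySem.Int.mod ((c.toNat : Int) - 32 + v) 95 ∧
        PySem.Int.mod ((c.toNat : Int) - 32 + v) 95 < 95 := by
      rw [mod95]; omega
    rw [get_table _ hmb.1 hmb.2]
    congr 3
    rw [mod95]
    omega
  · rw [if_neg hc]
    simp [rotChar, (mem_table_iff c).not.mp hc]

theorem outer_eq (v : Int) (l : List Char) (acc : List Char) :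
    l.foldl (fun palavra ch =>
      asciiChars.foldl (fun pal ascii_c =>
        if ch == ascii_c then
          pal ++ [PySem.List.pyGetD asciiChars
            (PySem.Int.mod ((((PySem.List.index? asciiChars ascii_c).getD 0 : Nat) : Int) + v)
              (asciiChars.length : Int)) ' ']
        else pal) palavra) acc = acc ++ l.flatMap (rotChar · v) := by
  induction l generalizing acc with
  | nil => simp
  | cons c l ih =>
    simp only [List.foldl_cons, List.flatMap_cons]
    rw [inner_eq, ih, List.append_assoc]

theorem rotacionar_eq (s : String) (v : Int) :
    rotacionar s v = String.ofList (s.toList.flatMap (rotChar · v)) := by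
  simp only [rotacionar]
  rw [outer_eq]
  simp

theorem rotChar_range (c : Char) (v : Int) (h1 : 32 ≤ c.toNat) (h2 : c.toNat ≤ 126) :
    rotChar c v = [Char.ofNat (32 + (PySem.Int.mod ((c.toNat : Int) - 32 + v) 95)).toNat] := by
  simp [rotChar, h1, h2]

theorem rotChar_comp (c : Char) :
    (rotChar c 1).flatMap (rotChar · (-3)) = rotChar c (-2) := by
  by_cases h : 32 ≤ c.toNat ∧ c.toNat ≤ 126
  · obtain ⟨h1, h2⟩ := h
    rw [rotChar_range c 1 h1 h2]
    have hm : 0 ≤ PySem.Int.mod ((c.toNat : Int) - 32 + 1) 95 ∧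
        PySem.Int.mod ((c.toNat : Int) - 32 + 1) 95 < 95 := by rw [mod95]; omega
    set m := PySem.Int.mod ((c.toNat : Int) - 32 + 1) 95 with hmdef
    have hvalid : (32 + m).toNat.isValidChar := Or.inl (by omega)
    have htn : (Char.ofNat (32 + m).toNat).toNat = (32 + m).toNat := by
      rw [Char.toNat_ofNat, if_pos hvalid]
    rw [List.flatMap_cons, List.flatMap_nil, List.append_nil]
    rw [rotChar_range _ (-3) (by omega) (by omega)]
    rw [rotChar_range c (-2) h1 h2]
    congr 3
    rw [htn]
    rw [hmdef, mod95, mod95, mod95]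
    omega
  · simp [rotChar, h]

theorem rotChar_reverse (c : Char) (v : Int) : (rotChar c v).reverse = rotChar c v := by
  unfold rotChar; split <;> simp

theorem foldl_push (l : List Char) (s : String) :
    l.foldl (fun s c => s.push c) s = s ++ String.ofList l := by
  induction l generalizing s with
  | nil => simp
  | cons c l ih =>
    simp only [List.foldl_cons, ih]
    apply String.ext
    simp

theorem enum_flatMap_split (g3 g2 : Char → List Char) (l : List Char) :
    ∀ (s k : Int),
    (PySem.List.enumerate l s).flatMap (fun p => if p.1 < k then g3 p.2 else g2 p.2)
      = (l.take (k - s).toNat).flatMap g3 ++ (l.drop (k - s).toNat).flatMap g2 := by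
  induction l with
  | nil => simp [PySem.List.enumerate]
  | cons c l ih =>
    intro s k
    rw [PySem.List.enumerate_cons, List.flatMap_cons]
    by_cases hs : s < k
    · rw [if_pos hs, ih (s+1) k,
        show (k - s).toNat = (k - (s+1)).toNat + 1 by omega]
      simp [List.append_assoc]
    · rw [if_neg hs, ih (s+1) k,
        show (k - s).toNat = 0 by omega, show (k - (s+1)).toNat = 0 by omega]
      simp

theorem filter_map_eq_flatMap (l : List (Int × Char)) (q : Int × Char → Prop) [DecidablePred q]
    (g : Int × Char → Char) :
    (l.filter (fun x => decide (q x))).map g = l.flatMap (fun x => if q x then [g x] else []) := by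
  induction l with
  | nil => simp
  | cons a l ih =>
    by_cases hq : q a
    · simp [hq, ih]
    · simp [hq, ih]

theorem mod2 (a : Int) : PySem.Int.mod a 2 = a % 2 := by
  rw [PySem.Int.mod, Int.fmod_eq_emod]; simp

-- ===== VERDICT (by name: the statement is the Claim_ definition above) =====
theorem descriptografa_spec : Claim_equal_descriptografa := by
  intro s _
  unfold Spec_descriptografa
  simp only [descriptografa, descriptografa_alt]
  have hfd : PySem.Int.floordiv (s.length : Int) 2 = ((s.length / 2 : Nat) : Int) := by
    rw [show (2:Int) = ((2:Nat):Int) from rfl, PySem.Int.floordiv_natCast]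
  have hls : (if (PySem.Int.mod (s.length : Int) 2 == 0) = true
        then ((s.length / 2 : Nat) : Int)
        else (s.length : Int) - ((s.length / 2 : Nat) : Int) - 1)
      = ((s.length / 2 : Nat) : Int) := by
    split_ifs with h
    · rfl
    · rw [beq_iff_eq, mod2] at h
      omega
  rw [hfd, ite_self, hls]
  rw [PySem.List.slice_to_natCast, PySem.List.slice_from_natCast]
  rw [rotacionar_eq, rotacionar_eq, foldl_push]
  simp only [String.empty_append, String.toList_append, String.toList_ofList,
    List.flatMap_reverse, Function.comp_def, rotChar_reverse, List.flatMap_append,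
    List.flatMap_assoc, rotChar_comp]
  rw [PySem.List.foldl_append_ite
      (p := fun p : Int × Char => 32 ≤ ((p.2.toNat : Int)) ∧ (p.2.toNat : Int) ≤ 126)
      (f := fun p : Int × Char => Char.ofNat (32 + PySem.Int.mod ((p.2.toNat : Int) - 32 +
        if p.1 < ((s.length / 2 : Nat) : Int) then -3 else -2) 95).toNat)
      (l := PySem.List.enumerate s.toList) (acc := [])]
  rw [filter_map_eq_flatMap (PySem.List.enumerate s.toList)
      (fun p : Int × Char => 32 ≤ ((p.2.toNat : Int)) ∧ (p.2.toNat : Int) ≤ 126)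
      (fun p : Int × Char => Char.ofNat (32 + PySem.Int.mod ((p.2.toNat : Int) - 32 +
        if p.1 < ((s.length / 2 : Nat) : Int) then -3 else -2) 95).toNat)]
  have hfun : ∀ (p : Int × Char),
      (if 32 ≤ ((p.2.toNat : Int)) ∧ (p.2.toNat : Int) ≤ 126 then
        [Char.ofNat (32 + PySem.Int.mod ((p.2.toNat : Int) - 32 +
          if p.1 < ((s.length / 2 : Nat) : Int) then -3 else -2) 95).toNat]
      else [])
      = (if p.1 < ((s.length / 2 : Nat) : Int) then rotChar p.2 (-3) else rotChar p.2 (-2)) := by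
    intro p
    by_cases hk : p.1 < ((s.length / 2 : Nat) : Int)
    · simp only [if_pos hk, rotChar]
      split_ifs with h1 h2 <;> first | rfl | omega
    · simp only [if_neg hk, rotChar]
      split_ifs with h1 h2 <;> first | rfl | omega
  simp only [hfun]
  rw [List.nil_append,
    enum_flatMap_split (fun c => rotChar c (-3)) (fun c => rotChar c (-2)) s.toList 0
      ((s.length / 2 : Nat) : Int)]
  have htn : ((s.length : Int) / 2).toNat = s.length / 2 := by omega
  simp [htn]
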